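-- pv_equiv track=rewrite | github.com/lweihao99/Python-data | Documents/Esame uni/2020_07_20/vendite copy.py | individuaAcquirente
-- ===== SOURCE A (Python) =====
-- def individuaAcquirente(ds):
--     # Implementa il codice della funzione qua sotto. La riga con il pass puo' essere cancellata.
--     di = {}
--     for tu in ds:
--         tipo_operazione = tu[0]
--         if tipo_operazione == 'catasto':
--             id_proprietario = tu[2]
--             if id_proprietario not in di:
--                 di[id_proprietario] = 1
--             else:
--                 di[id_proprietario] += 1
--
--     mobili_aquistati = 0
--     idProprietario = 0
--     for key in di:
--         if di[key] > mobili_aquistati: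
--             mobili_aquistati = di[key]
--             idProprietario = key
--
--     return (idProprietario, mobili_aquistati)
-- ===== SOURCE B (Python) =====
-- def individuaAcquirente(ds):
--     counts = {}
--     for tu in ds:
--         if tu[0] == 'catasto':
--             counts[tu[2]] = counts.get(tu[2], 0) + 1
--     ranked = sorted(counts.items(), key=lambda kv: -kv[1])
--     return ranked[0] if ranked else (0, 0)
-- ===== Notes on version B (the rewrite author's own statement) =====
-- stated objective: alternative
-- what changed: B counts with dict.get(...,0)+1 and replaces A's explicit running-maximum scan over the dict by a stable sort of counts.items() by descending count, returning the first element (ties keep A's first-inserted winner; empty input still yields (0,0)).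
import Mathlib
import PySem

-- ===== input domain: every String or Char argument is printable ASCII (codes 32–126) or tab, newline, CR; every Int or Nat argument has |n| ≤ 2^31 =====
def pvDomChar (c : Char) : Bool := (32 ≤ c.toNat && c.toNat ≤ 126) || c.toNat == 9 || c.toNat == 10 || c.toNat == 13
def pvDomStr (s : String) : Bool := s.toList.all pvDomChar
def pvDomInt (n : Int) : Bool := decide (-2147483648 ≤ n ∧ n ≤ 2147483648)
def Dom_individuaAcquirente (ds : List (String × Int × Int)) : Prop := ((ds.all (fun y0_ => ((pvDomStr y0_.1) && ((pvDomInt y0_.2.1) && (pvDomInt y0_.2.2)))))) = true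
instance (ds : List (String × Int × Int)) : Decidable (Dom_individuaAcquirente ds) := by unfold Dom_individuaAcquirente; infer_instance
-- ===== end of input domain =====

-- B replaces A's running-maximum scan over the dict by a stable sort of the count items
-- by descending count, taking the first element (objective: alternative; same tie-break).

-- ===== PORT A =====
def individuaAcquirente (ds : List (String × Int × Int)) : Int × Int :=
  -- di = {}; for tu in ds: if tu[0]=='catasto': count tu[2]
  let di : PySem.Dict Int Int := ds.foldl (fun di tu =>
    if tu.1 == "catasto" then
      if di.contains tu.2.2 = false then di.insert tu.2.2 1
      else di.insert tu.2.2 (di.getD tu.2.2 0 + 1)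
    else di) PySem.Dict.empty
  -- mobili_aquistati = 0; idProprietario = 0; for key in di: …
  let r : Int × Int := di.keys.foldl (fun s key =>
    if di.getD key 0 > s.2 then (key, di.getD key 0) else s) ((0 : Int), (0 : Int))
  r

-- ===== PORT B =====
def individuaAcquirente_alt (ds : List (String × Int × Int)) : Int × Int :=
  -- counts[tu[2]] = counts.get(tu[2], 0) + 1 on 'catasto' records
  let counts : PySem.Dict Int Int := ds.foldl (fun d tu =>
    if tu.1 == "catasto" then d.insert tu.2.2 (d.getD tu.2.2 0 + 1) else d) PySem.Dict.empty
  -- ranked = sorted(counts.items(), key=lambda kv: -kv[1]); ranked[0] if ranked else (0, 0)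
  let ranked := PySem.List.sorted counts.items (fun kv => -kv.2) false
  match ranked with
  | [] => ((0 : Int), (0 : Int))
  | p :: _ => p

-- ===== PRECONDITION & SPEC =====
def Spec_individuaAcquirente (ds : List (String × Int × Int)) (out : Int × Int) : Prop := out = individuaAcquirente_alt ds
instance (ds : List (String × Int × Int)) (out : Int × Int) : Decidable (Spec_individuaAcquirente ds out) := by unfold Spec_individuaAcquirente; infer_instance

-- ===== CLAIM (what is proved, stated in full; the proofs are below) =====
def Claim_equal_individuaAcquirente : Prop := ∀ (ds : List (String × Int × Int)), Dom_individuaAcquirente ds → Spec_individuaAcquirente ds (individuaAcquirente ds)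

-- ===== LEMMAS AND PROOFS =====

-- the counting step both programs share, on the filtered record list
def pvStep (d : PySem.Dict Int Int) (tu : String × Int × Int) : PySem.Dict Int Int :=
  d.insert tu.2.2 (d.getD tu.2.2 0 + 1)

-- A's and B's counting loops build the same dict
lemma dict_eq (ds : List (String × Int × Int)) :
    (ds.foldl (fun di tu =>
      if tu.1 == "catasto" then
        if di.contains tu.2.2 = false then di.insert tu.2.2 1
        else di.insert tu.2.2 (di.getD tu.2.2 0 + 1)
      else di) PySem.Dict.empty)
    = (ds.filter (fun tu => tu.1 == "catasto")).foldl pvStep PySem.Dict.empty := by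
  have hcong : ∀ (d : PySem.Dict Int Int) (tu : String × Int × Int), tu ∈ ds →
      (if tu.1 == "catasto" then
        if d.contains tu.2.2 = false then d.insert tu.2.2 1
        else d.insert tu.2.2 (d.getD tu.2.2 0 + 1)
      else d)
      = (if tu.1 == "catasto" then pvStep d tu else d) := by
    intro d tu _
    by_cases h : d.contains tu.2.2
    · simp [pvStep, h]
    · simp only [Bool.not_eq_true] at h
      simp [pvStep, h, PySem.Dict.getD_of_not_contains _ _ h]
  rw [PySem.List.foldl_congr_mem ds _
      (fun d tu => if tu.1 == "catasto" then pvStep d tu else d) PySem.Dict.empty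
      (fun acc x hx => hcong acc x hx)]
  exact PySem.List.foldl_if_eq_foldl_filter (fun tu => tu.1 == "catasto") pvStep ds PySem.Dict.empty

lemma dict_alt_eq (ds : List (String × Int × Int)) :
    (ds.foldl (fun d tu =>
      if tu.1 == "catasto" then d.insert tu.2.2 (d.getD tu.2.2 0 + 1) else d) PySem.Dict.empty)
    = (ds.filter (fun tu => tu.1 == "catasto")).foldl pvStep PySem.Dict.empty := by
  exact PySem.List.foldl_if_eq_foldl_filter (fun tu => tu.1 == "catasto")
      pvStep ds PySem.Dict.empty

-- every stored count is ≥ 1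
lemma values_pos (l : List (String × Int × Int)) (d : PySem.Dict Int Int)
    (h : ∀ p ∈ d.items, 1 ≤ p.2) : ∀ p ∈ (l.foldl pvStep d).items, 1 ≤ p.2 := by
  induction l generalizing d with
  | nil => exact h
  | cons x t ih =>
    refine ih _ ?_
    intro p hp
    rcases (PySem.Dict.mem_items_insert _ _ _ _).1 hp with hpe | ⟨hpd, _⟩
    · subst hpe
      rcases hg : d.get? x.2.2 with _ | v
      · simp [PySem.Dict.getD_of_get?_eq_none d 0 hg]
      · have := h _ (PySem.Dict.mem_items_of_get?_eq_some d hg)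
        simp only [PySem.Dict.getD_of_get?_eq_some d 0 hg]
        omega
    · exact h _ hpd

lemma keys_nodup (l : List (String × Int × Int)) :
    (l.foldl pvStep PySem.Dict.empty).keys.Nodup := by
  have := PySem.Dict.nodup_keys_foldl_insert_key l (key := fun tu => tu.2.2)
    (f := fun (d : PySem.Dict Int Int) tu => d.getD tu.2.2 0 + 1) PySem.Dict.empty (by simp)
  have h2 : pvStep = fun (d : PySem.Dict Int Int) (tu : String × Int × Int) =>
      d.insert tu.2.2 (d.getD tu.2.2 0 + 1) := rfl
  rw [h2]
  simpa using this

-- the insertion-sort fold never empties a nonempty accumulator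
lemma foldl_insertBy_ne_nil (u : List (Int × Int)) (acc : List (Int × Int)) (hacc : acc ≠ []) :
    u.foldl (fun acc x => PySem.List.insertBy (fun a b => decide ((-a.2) < (-b.2))) x acc) acc ≠ [] := by
  induction u generalizing acc with
  | nil => exact hacc
  | cons y v ihv =>
    refine ihv _ ?_
    rcases acc with _ | ⟨a0, arest⟩
    · exact absurd rfl hacc
    · simp only [PySem.List.insertBy]
      split <;> simp

-- head of the insertion sort (descending by count) = A's running-max scan
lemma head_foldl_insertBy (t : List (Int × Int)) (h : Int × Int) (rest : List (Int × Int)) :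
    (t.foldl (fun acc x => PySem.List.insertBy (fun a b => decide ((-a.2) < (-b.2))) x acc)
        (h :: rest)).headD (0, 0)
      = t.foldl (fun s x => if x.2 > s.2 then x else s) h := by
  induction t generalizing h rest with
  | nil => rfl
  | cons x t ih =>
    simp only [List.foldl_cons]
    by_cases hx : x.2 > h.2
    · have : PySem.List.insertBy (fun a b => decide ((-a.2) < (-b.2))) x (h :: rest)
          = x :: h :: rest := by
        simp [PySem.List.insertBy]; omega
      rw [this, ih, if_pos hx]
    · have : PySem.List.insertBy (fun a b => decide ((-a.2) < (-b.2))) x (h :: rest)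
          = h :: PySem.List.insertBy (fun a b => decide ((-a.2) < (-b.2))) x rest := by
        simp [PySem.List.insertBy]; omega
      rw [this, ih, if_neg hx]

-- the whole comparison, for any dict with nodup keys and positive counts
lemma pick_eq (d : PySem.Dict Int Int) (hnd : d.keys.Nodup)
    (hpos : ∀ p ∈ d.items, 1 ≤ p.2) :
    (d.keys.foldl (fun s key =>
        if d.getD key 0 > s.2 then (key, d.getD key 0) else s) ((0 : Int), (0 : Int)))
    = (match PySem.List.sorted d.items (fun kv => -kv.2) false with
       | [] => ((0 : Int), (0 : Int))
       | p :: _ => p) := by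
  have hitems := PySem.Dict.items_eq_map_keys d hnd 0
  have hscan : (d.keys.foldl (fun s key =>
      if d.getD key 0 > s.2 then (key, d.getD key 0) else s) ((0 : Int), (0 : Int)))
      = d.items.foldl (fun s p => if p.2 > s.2 then p else s) ((0 : Int), (0 : Int)) := by
    rw [hitems, List.foldl_map]
  rw [hscan, PySem.List.sorted_eq_foldl_insertBy]
  rcases hd : d.items with _ | ⟨p, t⟩
  · rfl
  · have hp1 : 1 ≤ p.2 := hpos p (by rw [hd]; exact List.mem_cons_self)
    simp only [List.foldl_cons]
    have h0 : (if p.2 > (0 : Int) then p else ((0 : Int), (0 : Int))) = p := by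
      rw [if_pos (by omega)]
    have hins : PySem.List.insertBy (fun a b => decide ((-a.2) < (-b.2))) p ([] : List (Int × Int)) = [p] := by
      simp [PySem.List.insertBy]
    rw [h0, hins]
    have := head_foldl_insertBy t p []
    rcases hres : (t.foldl (fun acc x => PySem.List.insertBy (fun a b => decide ((-a.2) < (-b.2))) x acc) [p]) with _ | ⟨q, r⟩
    · exact absurd hres (foldl_insertBy_ne_nil t [p] (by simp))
    · rw [hres] at this
      rw [hres]
      simpa using this.symm

-- ===== VERDICT (by name: the statement is the Claim_ definition above) =====
theorem individuaAcquirente_spec : Claim_equal_individuaAcquirente := by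
  intro ds _
  unfold Spec_individuaAcquirente individuaAcquirente individuaAcquirente_alt
  rw [dict_eq, dict_alt_eq]
  exact pick_eq _ (keys_nodup (ds.filter (fun tu => tu.1 == "catasto")))
    (values_pos (ds.filter (fun tu => tu.1 == "catasto")) PySem.Dict.empty (by simp [PySem.Dict.empty]))
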